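-- pv_equiv track=rewrite | github.com/pypi-data/pypi-mirror-52 | packages/mih-viterbi/mih-viterbi-0.1.0.tar.gz/mih-viterbi-0.1.0/viterbi.py | path_best
-- ===== SOURCE A (Python) =====
-- def path_best(pathes):
--
--     best = []
--
--     for p in pathes[-1]:
--         path = []
--         path.append(p[1])
--         path.append(p[0])
--
--         s = p[0]
--         for i in pathes[:-1][::-1]:
--             for j in i:
--                 # 1st match
--                 if s == j[1]:
--                     s = j[0]
--                     path.append(s)
--                     break
--
--         path = path[:-1][::-1]
--         best.append(path)
--
--     return best
-- ===== SOURCE B (Python) =====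
-- def path_best(pathes):
--     # Forward dynamic programming: one left-to-right pass over the non-final
--     # layers builds a table mapping each state s to the full backtrace suffix
--     # resolve(s) (list of predecessors, shared between endpoints); each endpoint
--     # then needs a single table lookup instead of rescanning every layer.
--     *init, last = pathes
--     tails = {}
--     for layer in init:
--         new = {}
--         for a, b in layer:
--             if b not in new:
--                 new[b] = [a] + tails.get(a, [])
--         tails.update(new)
--     best = []
--     for a0, b0 in last:
--         raw = [b0, a0] + tails.get(a0, [])
--         best.append(raw[:-1][::-1])
--     return best
-- ===== Notes on version B (the rewrite author's own statement) =====
-- stated objective: alternative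
-- what changed: B replaces A's per-endpoint backward rescans of every earlier layer with a single forward dynamic-programming pass that builds a table mapping each state to its complete (tail-shared) backtrace suffix, so each endpoint is answered by one table lookup; asymptotically cheaper with many endpoints, not measurably faster on the benchmarked shapes.
-- outside the precondition, e.g. on path_best([]): A raises IndexError, B raises ValueError
import Mathlib
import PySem

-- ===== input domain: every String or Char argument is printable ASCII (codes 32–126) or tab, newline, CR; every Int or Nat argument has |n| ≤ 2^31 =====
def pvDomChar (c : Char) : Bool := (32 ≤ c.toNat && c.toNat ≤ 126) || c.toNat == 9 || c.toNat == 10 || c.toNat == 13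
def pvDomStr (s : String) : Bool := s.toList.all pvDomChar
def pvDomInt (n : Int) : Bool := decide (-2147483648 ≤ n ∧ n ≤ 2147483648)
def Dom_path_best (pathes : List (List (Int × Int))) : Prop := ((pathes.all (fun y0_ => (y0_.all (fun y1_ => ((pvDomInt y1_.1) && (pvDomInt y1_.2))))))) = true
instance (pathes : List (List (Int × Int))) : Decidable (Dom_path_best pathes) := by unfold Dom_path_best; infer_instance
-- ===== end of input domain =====

-- B builds, in one forward pass, a table mapping each state to its full (shared)
-- backtrace suffix, so each endpoint needs one lookup instead of A's per-endpoint
-- rescans of every earlier layer: a different, table-driven decomposition.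


-- ===== PORT A =====
-- inner 'for j in i: if s == j[1]: … break' — first match in the layer
def pathBestInnerA (s : Int) : List (Int × Int) → Option Int
  | [] => none
  | j :: rest => if s == j.2 then some j.1 else pathBestInnerA s rest

-- outer 'for i in pathes[:-1][::-1]' carrying (s, path)
def pathBestOuterA : List (List (Int × Int)) → Int × List Int → Int × List Int
  | [], st => st
  | i :: rest, (s, path) =>
    match pathBestInnerA s i with
    | some s' => pathBestOuterA rest (s', path ++ [s'])
    | none => pathBestOuterA rest (s, path)

def path_best (pathes : List (List (Int × Int))) : List (List Int) :=
  ((PySem.List.pyGet? pathes (-1)).getD []).map (fun p =>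
    let st := pathBestOuterA ((PySem.List.slice pathes none (some (-1))).reverse) (p.1, [p.2, p.1])
    (PySem.List.slice st.2 none (some (-1))).reverse)

-- ===== PORT B =====
-- 'new = {}; for a, b in layer: if b not in new: new[b] = [a] + tails.get(a, [])'
def pathBestLayerNew (tails : PySem.Dict Int (List Int)) (layer : List (Int × Int)) :
    PySem.Dict Int (List Int) :=
  layer.foldl
    (fun new j => if new.contains j.2 then new else new.insert j.2 (j.1 :: tails.getD j.1 []))
    PySem.Dict.empty

def path_best_alt (pathes : List (List (Int × Int))) : List (List Int) :=
  match pathes.getLast? with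
  | none => []   -- '*init, last = pathes' raises ValueError here (outside Pre_)
  | some last =>
    -- 'for layer in init: … ; tails.update(new)'
    let tails := pathes.dropLast.foldl
      (fun t layer => t.update (pathBestLayerNew t layer).items) PySem.Dict.empty
    last.map (fun p =>
      let raw := [p.2, p.1] ++ tails.getD p.1 []
      (PySem.List.slice raw none (some (-1))).reverse)

-- ===== PRECONDITION & SPEC =====
-- A evaluates pathes[-1]: IndexError on an empty list, so Pre_ excludes only pathes = []
def Pre_path_best (pathes : List (List (Int × Int))) : Prop := pathes ≠ []
instance (pathes : List (List (Int × Int))) : Decidable (Pre_path_best pathes) := by unfold Pre_path_best; infer_instance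
def pvWitness_path_best : (List (List (Int × Int))) := [[(1, 2)], [(3, 1), (0, 1)]]

def Spec_path_best (pathes : List (List (Int × Int))) (out : List (List Int)) : Prop := out = path_best_alt pathes
instance (pathes : List (List (Int × Int))) (out : List (List Int)) : Decidable (Spec_path_best pathes out) := by unfold Spec_path_best; infer_instance

-- ===== CLAIM (what is proved, stated in full; the proofs are below) =====
def Claim_equal_path_best : Prop := ∀ (pathes : List (List (Int × Int))), Dom_path_best pathes → Pre_path_best pathes → Spec_path_best pathes (path_best pathes)

-- ===== LEMMAS AND PROOFS =====

-- the backtrace chain of first-match predecessors, layers given top-down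
def pathBestChain : List (List (Int × Int)) → Int → List Int
  | [], _ => []
  | l :: rest, s =>
    match pathBestInnerA s l with
    | some s' => s' :: pathBestChain rest s'
    | none => pathBestChain rest s

lemma pathBestOuterA_snd (layers : List (List (Int × Int))) :
    ∀ (s : Int) (path : List Int),
      (pathBestOuterA layers (s, path)).2 = path ++ pathBestChain layers s := by
  induction layers with
  | nil => intro s path; simp [pathBestOuterA, pathBestChain]
  | cons l rest ih =>
    intro s path
    simp only [pathBestOuterA, pathBestChain]
    cases pathBestInnerA s l <;> simp [ih]

lemma pathBestLayerNew_foldl_get? (tails : PySem.Dict Int (List Int))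
    (layer : List (Int × Int)) :
    ∀ (new : PySem.Dict Int (List Int)) (s : Int),
      (layer.foldl
        (fun new j => if new.contains j.2 then new else new.insert j.2 (j.1 :: tails.getD j.1 []))
        new).get? s
        = (match new.get? s with
           | some v => some v
           | none => (pathBestInnerA s layer).map (fun a => a :: tails.getD a [])) := by
  induction layer with
  | nil => intro new s; cases h : new.get? s <;> simp [pathBestInnerA, h]
  | cons j rest ih =>
    intro new s
    simp only [List.foldl_cons]
    by_cases hc : new.contains j.2
    · rw [if_pos hc, ih]
      cases h : new.get? s with
      | some v => simp
      | none =>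
        have hne : ¬ (s == j.2) = true := by
          intro hbe
          have : s = j.2 := by simpa using hbe
          rw [PySem.Dict.contains_eq_isSome_get?] at hc
          rw [this] at h
          rw [h] at hc
          simp at hc
        simp [pathBestInnerA, hne]
    · rw [if_neg hc, ih]
      rw [PySem.Dict.get?_insert]
      have h2 : new.get? j.2 = none := by
        rw [PySem.Dict.contains_eq_isSome_get?] at hc
        cases h : new.get? j.2 with
        | some v => rw [h] at hc; simp at hc
        | none => rfl
      by_cases hs : s = j.2
      · subst hs
        simp [h2, pathBestInnerA]
      · simp only [if_neg hs]
        cases h : new.get? s with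
        | some v => simp
        | none => simp [pathBestInnerA, hs]

lemma pathBestLayerNew_get? (tails : PySem.Dict Int (List Int)) (layer : List (Int × Int))
    (s : Int) :
    (pathBestLayerNew tails layer).get? s
      = (pathBestInnerA s layer).map (fun a => a :: tails.getD a []) := by
  unfold pathBestLayerNew
  rw [pathBestLayerNew_foldl_get?]
  simp [PySem.Dict.get?_empty]

lemma pathBestLayerNew_nodup_aux (tails : PySem.Dict Int (List Int))
    (layer : List (Int × Int)) :
    ∀ (new : PySem.Dict Int (List Int)), new.keys.Nodup →
      (layer.foldl
        (fun new j => if new.contains j.2 then new else new.insert j.2 (j.1 :: tails.getD j.1 []))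
        new).keys.Nodup := by
  induction layer with
  | nil => intro new h; simpa using h
  | cons j rest ih =>
    intro new h
    simp only [List.foldl_cons]
    by_cases hc : new.contains j.2
    · rw [if_pos hc]; exact ih new h
    · rw [if_neg hc]; exact ih _ (PySem.Dict.nodup_keys_insert _ _ _ h)

lemma pathBestLayerNew_nodup (tails : PySem.Dict Int (List Int)) (layer : List (Int × Int)) :
    (pathBestLayerNew tails layer).keys.Nodup :=
  pathBestLayerNew_nodup_aux tails layer PySem.Dict.empty (by simp)

-- d.get? as the first match in d.items
lemma dict_get?_eq_find? (items : List (Int × List Int)) (s : Int) :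
    (PySem.Dict.mk items).get? s = (items.find? (fun p => p.1 == s)).map (·.2) := by
  induction items with
  | nil => simp [PySem.Dict.get?]
  | cons p rest ih =>
    rw [show (p :: rest) = ((p.1, p.2) :: rest) by simp, PySem.Dict.get?_mk_cons]
    by_cases h : p.1 = s
    · simp [h, List.find?]
    · have : ¬ (p.1 == s) = true := by simpa using h
      simp only [List.find?, this]
      exact ih

-- 'tails.update(new)': update = foldl insert over new.items; with Nodup keys,
-- lookup in the result is lookup in new, falling back to tails
lemma foldl_insert_get? (ps : List (Int × List Int)) :
    ∀ (t : PySem.Dict Int (List Int)) (s : Int), (ps.map (·.1)).Nodup →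
      (ps.foldl (fun d p => d.insert p.1 p.2) t).get? s
        = (match (ps.find? (fun p => p.1 == s)).map (·.2) with
           | some v => some v
           | none => t.get? s) := by
  induction ps with
  | nil => intro t s _; simp
  | cons p rest ih =>
    intro t s hn
    simp only [List.map_cons, List.nodup_cons] at hn
    simp only [List.foldl_cons]
    rw [ih _ _ hn.2]
    by_cases hs : p.1 = s
    · have hfind : rest.find? (fun q => q.1 == s) = none := by
        rw [List.find?_eq_none]
        intro q hq hbe
        have hq1 : q.1 = s := by simpa using hbe
        exact hn.1 (by rw [hs, ← hq1]; exact List.mem_map_of_mem hq)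
      simp [List.find?, hs, hfind]
    · have : ¬ (p.1 == s) = true := by simpa using hs
      simp only [List.find?, this]
      cases h : (rest.find? (fun q => q.1 == s)).map (·.2) with
      | some v => simp
      | none =>
        simp only []
        rw [PySem.Dict.get?_insert, if_neg (fun h' => hs h'.symm)]

lemma update_get? (t new : PySem.Dict Int (List Int)) (s : Int) (hn : new.keys.Nodup) :
    (t.update new.items).get? s
      = (match new.get? s with | some v => some v | none => t.get? s) := by
  have hupd : t.update new.items = new.items.foldl (fun d p => d.insert p.1 p.2) t := rfl
  have hkeys : new.keys = new.items.map (·.1) := rfl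
  rw [hupd, foldl_insert_get? _ _ _ (by rw [← hkeys]; exact hn)]
  have : new.get? s = (new.items.find? (fun p => p.1 == s)).map (·.2) := by
    have : new = PySem.Dict.mk new.items := rfl
    rw [this]
    exact dict_get?_eq_find? _ s
  rw [this]

-- the forward DP table agrees with the backward chain
lemma tails_getD (L : List (List (Int × Int))) :
    ∀ (s : Int),
      ((L.foldl (fun t layer => t.update (pathBestLayerNew t layer).items)
          PySem.Dict.empty).getD s [])
        = pathBestChain L.reverse s := by
  induction L using List.reverseRecOn with
  | nil => intro s; simp [pathBestChain, PySem.Dict.getD_empty]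
  | append_singleton L l ih =>
    intro s
    rw [List.foldl_append, List.foldl_cons, List.foldl_nil, List.reverse_append]
    simp only [List.reverse_cons, List.reverse_nil, List.nil_append, List.singleton_append,
      pathBestChain]
    rw [PySem.Dict.getD_eq_get?_getD,
        update_get? _ _ _ (pathBestLayerNew_nodup _ l),
        pathBestLayerNew_get?]
    cases h : pathBestInnerA s l with
    | some a => simp [← ih a]
    | none => simp [← ih s, PySem.Dict.getD_eq_get?_getD]

-- ===== VERDICT (by name: the statement is the Claim_ definition above) =====
theorem path_best_spec : Claim_equal_path_best := by
  intro pathes _ hpre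
  have h0 : pathes ≠ [] := hpre
  unfold Spec_path_best path_best path_best_alt
  have hlast : pathes.getLast? = some (pathes.getLast h0) := List.getLast?_eq_some_getLast h0
  rw [hlast]
  have hA : PySem.List.pyGet? pathes (-1) = some (pathes.getLast h0) := by
    rw [PySem.List.pyGet?_neg_one, hlast]
  rw [hA, PySem.List.slice_to_neg_one]
  simp only [Option.getD_some]
  apply List.map_congr_left
  intro p _
  rw [pathBestOuterA_snd, tails_getD]
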